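-- pv_equiv track=rewrite | github.com/richmanpoorman/FunctionalProgrammingPractice | BlackJack/blackJack.py | reduceHandTotal
-- ===== SOURCE A (Python) =====
-- def reduceHandTotal(handValues, maxSize):
--         '''
--         Name       : reduceHandTotal
--         Parameters : (List[int]) handValues := The values of the current cards; assumes unreduced aces are 11;
--                      (int)       maxSize    := The total size that the hand can currently go up to
--         Return     : (int) The total sum that is maximally maxSize, or the minimum over maxSize if it is impossible to be under maxSize
--         Purpose    : Finds the best possible sum for the given hand
--         '''
--
--         totalSum  = sum(handValues)
--         if (len(handValues) == 0):
--                 return totalSum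
--
--         if totalSum <= maxSize:
--                 return totalSum
--         else: # Check if the first value is an Ace to reduce, then go along
--                 firstVal = handValues[0]
--                 if firstVal == 11:
--                         return 1 + reduceHandTotal(handValues[1:], maxSize - 1)
--                 else:
--                         return firstVal + reduceHandTotal(handValues[1:], maxSize - firstVal)
-- ===== SOURCE B (Python) =====
-- def reduceHandTotal(handValues, maxSize):
--     total = sum(handValues)
--     for v in handValues:
--         if total <= maxSize:
--             return total
--         if v == 11:
--             total -= 10
--     return total
-- ===== Notes on version B (the rewrite author's own statement) =====
-- stated objective: alternative
-- what changed: Replaces the recursion that re-slices and re-sums the list at every step with a single linear pass that computes the sum once and subtracts 10 per leading ace while the total exceeds maxSize.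
import Mathlib
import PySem

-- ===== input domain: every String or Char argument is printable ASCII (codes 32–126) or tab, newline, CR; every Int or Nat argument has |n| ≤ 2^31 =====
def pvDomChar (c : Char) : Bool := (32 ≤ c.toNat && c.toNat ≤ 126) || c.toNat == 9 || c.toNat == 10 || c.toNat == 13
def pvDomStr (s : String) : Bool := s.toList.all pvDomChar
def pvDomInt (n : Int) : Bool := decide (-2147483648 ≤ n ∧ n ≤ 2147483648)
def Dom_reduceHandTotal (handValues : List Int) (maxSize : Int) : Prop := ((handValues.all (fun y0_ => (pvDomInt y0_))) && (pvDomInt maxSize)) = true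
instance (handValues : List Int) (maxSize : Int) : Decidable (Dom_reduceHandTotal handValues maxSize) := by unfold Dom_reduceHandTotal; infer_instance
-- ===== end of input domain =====

-- B replaces A's recursion (which re-slices and re-sums on every call) by one linear pass:
-- sum once, then subtract 10 per leading ace while the total exceeds maxSize.

-- ===== PORT A =====
-- A: recursive; totalSum = sum(handValues); empty → totalSum; totalSum ≤ maxSize → totalSum;
-- else peel the first card (an ace 11 counts as 1 and lowers maxSize by 1).
def reduceHandTotal (handValues : List Int) (maxSize : Int) : Int :=
  let totalSum := handValues.foldl (· + ·) 0     -- sum(handValues)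
  match handValues with
  | [] => totalSum
  | firstVal :: rest =>
    if totalSum ≤ maxSize then totalSum
    else if firstVal = 11 then 1 + reduceHandTotal rest (maxSize - 1)
    else firstVal + reduceHandTotal rest (maxSize - firstVal)

-- ===== PORT B =====
-- B's loop: walk the cards, stopping as soon as total ≤ maxSize, dropping 10 per ace seen.
def reduceLoop (total : Int) (maxSize : Int) : List Int → Int
  | [] => total
  | v :: rest =>
    if total ≤ maxSize then total
    else reduceLoop (if v = 11 then total - 10 else total) maxSize rest

def reduceHandTotal_alt (handValues : List Int) (maxSize : Int) : Int :=
  reduceLoop (handValues.foldl (· + ·) 0) maxSize handValues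

-- ===== PRECONDITION & SPEC =====
def Spec_reduceHandTotal (handValues : List Int) (maxSize : Int) (out : Int) : Prop := out = reduceHandTotal_alt handValues maxSize
instance (handValues : List Int) (maxSize : Int) (out : Int) : Decidable (Spec_reduceHandTotal handValues maxSize out) := by unfold Spec_reduceHandTotal; infer_instance

-- ===== CLAIM (what is proved, stated in full; the proofs are below) =====
def Claim_equal_reduceHandTotal : Prop := ∀ (handValues : List Int) (maxSize : Int), Dom_reduceHandTotal handValues maxSize → Spec_reduceHandTotal handValues maxSize (reduceHandTotal handValues maxSize)

-- ===== LEMMAS AND PROOFS =====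

theorem foldl_add_shift (l : List Int) (c : Int) :
    l.foldl (· + ·) c = c + l.foldl (· + ·) 0 := by
  induction l generalizing c with
  | nil => simp
  | cons a t ih =>
    simp only [List.foldl]
    rw [ih (c + a), ih (0 + a)]
    ring

theorem reduceLoop_shift (l : List Int) (t m c : Int) :
    reduceLoop (t + c) (m + c) l = c + reduceLoop t m l := by
  induction l generalizing t with
  | nil => simp [reduceLoop]; ring
  | cons v rest ih =>
    simp only [reduceLoop]
    by_cases h : t ≤ m
    · rw [if_pos (by omega), if_pos h]; ring
    · rw [if_neg (by omega), if_neg h]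
      by_cases hv : v = 11
      · rw [if_pos hv, if_pos hv, show t + c - 10 = (t - 10) + c by ring, ih]
      · rw [if_neg hv, if_neg hv, ih]

theorem reduce_eq (l : List Int) (m : Int) :
    reduceHandTotal l m = reduceLoop (l.foldl (· + ·) 0) m l := by
  induction l generalizing m with
  | nil => simp [reduceHandTotal, reduceLoop]
  | cons v rest ih =>
    simp only [reduceHandTotal, reduceLoop, List.foldl, zero_add]
    by_cases h : List.foldl (· + ·) v rest ≤ m
    · rw [if_pos h, if_pos h]
    · rw [if_neg h, if_neg h]
      by_cases hv : v = 11
      · subst hv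
        rw [if_pos rfl, if_pos rfl, ih]
        have hs := foldl_add_shift rest (11 : Int)
        have h1 : List.foldl (· + ·) (11 : Int) rest - 10 = List.foldl (· + ·) 0 rest + 1 := by
          omega
        have h2 := reduceLoop_shift rest (List.foldl (· + ·) 0 rest) (m - 1) 1
        rw [show m - 1 + 1 = m by ring] at h2
        rw [h1, h2]
      · rw [if_neg hv, if_neg hv, ih]
        have hs := foldl_add_shift rest v
        have h2 := reduceLoop_shift rest (List.foldl (· + ·) 0 rest) (m - v) v
        rw [show m - v + v = m by ring] at h2
        rw [hs, add_comm v (List.foldl (· + ·) 0 rest), ← h2]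

-- ===== VERDICT (by name: the statement is the Claim_ definition above) =====
theorem reduceHandTotal_spec : Claim_equal_reduceHandTotal := by
  intro hv m _
  unfold Spec_reduceHandTotal reduceHandTotal_alt
  exact reduce_eq hv m
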